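-- pv_equiv track=rewrite | github.com/adhitama19/Adhitama-Budi-210CT-Assignment | 210CT-Week-5/task_one.py | split_substring
-- ===== SOURCE A (Python) =====
-- def split_substring(split_list):
--
--     first_elm = split_list[0]               # set the first element for comparison
--     sub_list = [[first_elm]]                # set list inside list
--
--     for elm in split_list[1:]:              # loop list starting from index 1
--         if elm > first_elm:                 # compare if the element is bigger than first
--             first_elm = elm                 # set the first_elm to current elm
--             sub_list[-1].append(elm)        # append item to the last sub_list
--
--
--         else:
--             first_elm = elm
--             sub_list.append([first_elm])    # creates new list inside sub_list list
--
--     maximum_sublist = max(sub_list, key = len)  # sort the longest length in sub_list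
--     count_sublist = len(sub_list)               # count number of sublist created
--
--
--     statement =  ("There are %d sub-list found from this list \nThe maximum substring in this set of list is: %s" % (count_sublist, maximum_sublist))
--
--     return statement
-- ===== SOURCE B (Python) =====
-- def split_substring(split_list):
--     # Different decomposition: find each maximal strictly-increasing run's end index
--     # and slice the run out, instead of mutating a growing list-of-lists element by element.
--     n = len(split_list)
--
--     def run_end(i):
--         k = i + 1
--         while k < n and split_list[k] > split_list[k - 1]:
--             k += 1
--         return k
--
--     sub_list = []
--     i = 0
--     while i < n:
--         j = run_end(i)
--         sub_list.append(split_list[i:j])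
--         i = j
--
--     maximum_sublist = max(sub_list, key=len)
--     count_sublist = len(sub_list)
--     return ("There are %d sub-list found from this list \nThe maximum substring in this set of list is: %s"
--             % (count_sublist, maximum_sublist))
-- ===== Notes on version B (the rewrite author's own statement) =====
-- stated objective: alternative
-- what changed: B finds each maximal strictly-increasing run's end index and slices the run out of the input, instead of A's single fold that mutates the last element of a growing list-of-lists; Pre_ excludes the empty list, on which A raises IndexError (and B raises ValueError from max([])).
import Mathlib
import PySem

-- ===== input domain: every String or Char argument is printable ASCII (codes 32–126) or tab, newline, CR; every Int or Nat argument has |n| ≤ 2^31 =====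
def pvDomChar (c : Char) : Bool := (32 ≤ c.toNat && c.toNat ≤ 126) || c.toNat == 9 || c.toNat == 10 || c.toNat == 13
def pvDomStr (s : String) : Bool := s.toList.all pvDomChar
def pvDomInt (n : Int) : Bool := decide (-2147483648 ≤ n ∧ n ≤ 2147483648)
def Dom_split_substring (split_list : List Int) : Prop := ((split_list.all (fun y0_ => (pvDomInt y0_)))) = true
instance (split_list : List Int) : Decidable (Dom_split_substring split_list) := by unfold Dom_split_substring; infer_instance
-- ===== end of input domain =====

-- One honest line: B slices off maximal strictly-increasing runs by length instead of
-- A's fold that mutates the last sublist; same result, different decomposition (alternative).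

-- shared formatting helper (both Pythons share the identical format string; %s of a list of ints)
def pyIntListRepr (l : List Int) : String :=
  "[" ++ PySem.Str.join ", " (l.map PySem.Int.toStr) ++ "]"

def mkStatement (count : Int) (m : List Int) : String :=
  "There are " ++ PySem.Int.toStr count ++
    " sub-list found from this list \nThe maximum substring in this set of list is: " ++
    pyIntListRepr m

-- ===== PORT A =====
-- sub_list[-1].append(elm): append to the last sublist
def appendLastA : List (List Int) → Int → List (List Int)
  | [], _ => []
  | [r], e => [r ++ [e]]
  | r :: rs, e => r :: appendLastA rs e

def split_substring (split_list : List Int) : String :=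
  match PySem.List.pyGet? split_list 0 with
  | none => ""   -- IndexError on the empty list; excluded by Pre_
  | some first_elm =>
    let st := (PySem.List.slice split_list (some 1) none).foldl
      (fun (s : Int × List (List Int)) elm =>
        if s.1 < elm then (elm, appendLastA s.2 elm)
        else (elm, s.2 ++ [[elm]]))
      (first_elm, [[first_elm]])
    let sub_list := st.2
    match PySem.List.max? sub_list (fun r => r.length) with
    | none => ""   -- unreachable: sub_list is nonempty
    | some maximum_sublist => mkStatement (sub_list.length : Int) maximum_sublist

-- ===== PORT B =====
-- k-loop of run_end: k = i+1; while k < n and split_list[k] > split_list[k-1]: k += 1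
-- (fuel = lst.length only bounds the loop so the recursion is structural; it never cuts it short)
def firstRunAux (lst : List Int) (fuel : Nat) (k : Nat) : Nat :=
  match fuel with
  | 0 => k
  | fuel + 1 =>
    if k < lst.length ∧ lst.getD (k - 1) 0 < lst.getD k 0 then firstRunAux lst fuel (k + 1)
    else k

def runEnd (lst : List Int) (i : Nat) : Nat := firstRunAux lst lst.length (i + 1)

-- while i < n: j = run_end(i); append split_list[i:j]; i = j
-- (fuel = lst.length bounds the loop; every pass advances i by at least one)
def bLoop (lst : List Int) (fuel : Nat) (i : Nat) (acc : List (List Int)) : List (List Int) :=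
  match fuel with
  | 0 => acc
  | fuel + 1 =>
    if i < lst.length then
      bLoop lst fuel (runEnd lst i)
        (acc ++ [PySem.List.slice lst (some (i : Int)) (some ((runEnd lst i : Nat) : Int))])
    else acc

def split_substring_alt (split_list : List Int) : String :=
  let sub_list := bLoop split_list split_list.length 0 []
  match PySem.List.max? sub_list (fun r => r.length) with
  | none => ""   -- max([]) raises ValueError on the empty input; excluded by Pre_
  | some maximum_sublist => mkStatement (sub_list.length : Int) maximum_sublist

-- ===== PRECONDITION & SPEC =====
-- Pre_ excludes exactly the empty list, on which A raises IndexError (split_list[0]).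
def Pre_split_substring (split_list : List Int) : Prop := split_list ≠ []
instance (split_list : List Int) : Decidable (Pre_split_substring split_list) := by
  unfold Pre_split_substring; infer_instance

def pvWitness_split_substring : List Int := [3, 1, 2]

def Spec_split_substring (split_list : List Int) (out : String) : Prop := out = split_substring_alt split_list
instance (split_list : List Int) (out : String) : Decidable (Spec_split_substring split_list out) := by
  unfold Spec_split_substring; infer_instance

-- ===== CLAIM (what is proved, stated in full; the proofs are below) =====
def Claim_equal_split_substring : Prop := ∀ (split_list : List Int), Dom_split_substring split_list → Pre_split_substring split_list → Spec_split_substring split_list (split_substring split_list)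

-- ===== LEMMAS AND PROOFS =====

-- splitRun f xs = (continuation of the run ending in f, remainder of the list)
def splitRun (f : Int) : List Int → List Int × List Int
  | [] => ([], [])
  | e :: t => if f < e then ((splitRun e t).1.cons e, (splitRun e t).2) else ([], e :: t)

theorem splitRun_append (f : Int) (xs : List Int) :
    (splitRun f xs).1 ++ (splitRun f xs).2 = xs := by
  induction xs generalizing f with
  | nil => rfl
  | cons e t ih =>
    simp only [splitRun]
    split
    · simpa using ih e
    · rfl

theorem splitRun_snd_length_le (f : Int) (xs : List Int) :
    (splitRun f xs).2.length ≤ xs.length := by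
  conv_rhs => rw [← splitRun_append f xs]
  simp

-- the canonical run decomposition
def runsOf : List Int → List (List Int)
  | [] => []
  | x :: xs => (x :: (splitRun x xs).1) :: runsOf (splitRun x xs).2
termination_by l => l.length
decreasing_by
  have := splitRun_snd_length_le x xs
  simp; omega

-- ===== A-side: the fold computes the run decomposition =====
theorem foldA_spec (xs : List Int) (f : Int) (done : List (List Int)) (cur : List Int) :
    (xs.foldl (fun (s : Int × List (List Int)) elm =>
        if s.1 < elm then (elm, appendLastA s.2 elm)
        else (elm, s.2 ++ [[elm]])) (f, done ++ [cur])).2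
      = done ++ [cur ++ (splitRun f xs).1] ++ runsOf (splitRun f xs).2 := by
  induction xs generalizing f done cur with
  | nil => simp [splitRun, runsOf]
  | cons e t ih =>
    simp only [List.foldl_cons, splitRun]
    by_cases h : f < e
    · have ha : appendLastA (done ++ [cur]) e = done ++ [cur ++ [e]] := by
        clear ih
        induction done with
        | nil => rfl
        | cons d ds ihd =>
          cases ds with
          | nil => simp [appendLastA]
          | cons d' ds' => simpa [appendLastA] using ihd
      simp only [h, if_pos, ha]
      rw [ih e done (cur ++ [e])]
      simp
    · simp only [h, if_neg, not_false_iff]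
      rw [ih e (done ++ [cur]) [e]]
      simp [runsOf]

theorem subListA_eq_runsOf (x : Int) (xs : List Int) :
    ((xs.foldl (fun (s : Int × List (List Int)) elm =>
        if s.1 < elm then (elm, appendLastA s.2 elm)
        else (elm, s.2 ++ [[elm]])) (x, [[x]])).2) = runsOf (x :: xs) := by
  have := foldA_spec xs x [] [x]
  simpa [runsOf] using this

-- ===== B-side: the slicing loop computes the run decomposition =====
theorem firstRunAux_spec (lst : List Int) (fuel k : Nat) (h1 : 1 ≤ k) (h2 : k ≤ lst.length)
    (hf : lst.length ≤ k + fuel) :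
    firstRunAux lst fuel k = k + (splitRun (lst.getD (k - 1) 0) (lst.drop k)).1.length := by
  induction fuel generalizing k with
  | zero =>
    have hlen : lst.length ≤ k := by omega
    rw [firstRunAux, List.drop_eq_nil_of_le hlen]
    simp [splitRun]
  | succ fuel ih =>
  rw [firstRunAux]
  by_cases hk : k < lst.length
  · have hdrop : lst.drop k = lst[k] :: lst.drop (k + 1) := List.drop_eq_getElem_cons hk
    have hgk : lst.getD k 0 = lst[k] := by
      simp [List.getD_eq_getElem?_getD, List.getElem?_eq_getElem hk]
    by_cases hlt : lst.getD (k - 1) 0 < lst.getD k 0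
    · rw [if_pos ⟨hk, hlt⟩]
      rw [ih (k + 1) (by omega) (by omega) (by omega)]
      rw [hdrop]
      simp only [splitRun]
      rw [hgk] at hlt
      rw [if_pos hlt]
      have hg1 : lst.getD (k + 1 - 1) 0 = lst[k] := by
        simpa using hgk
      rw [hg1]
      simp
      omega
    · rw [if_neg (by tauto)]
      rw [hdrop]
      rw [hgk] at hlt
      have hlt' : ¬ lst[k - 1]?.getD 0 < lst[k] := by simpa [List.getD] using hlt
      simp [splitRun, hlt']
  · rw [if_neg (by omega)]
    rw [List.drop_eq_nil_of_le (by omega)]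
    simp [splitRun]

theorem runEnd_spec (lst : List Int) (i : Nat) (hi : i < lst.length) :
    runEnd lst i = (i + 1) + (splitRun lst[i] (lst.drop (i + 1))).1.length := by
  have h := firstRunAux_spec lst lst.length (i + 1) (by omega) (by omega) (by omega)
  have hgi : lst.getD (i + 1 - 1) 0 = lst[i] := by
    simp [List.getD_eq_getElem?_getD, List.getElem?_eq_getElem hi]
  rw [runEnd, h, hgi]

theorem bLoop_spec (lst : List Int) (fuel i : Nat) (acc : List (List Int))
    (hf : lst.length ≤ i + fuel) :
    bLoop lst fuel i acc = acc ++ runsOf (lst.drop i) := by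
  induction fuel generalizing i acc with
  | zero =>
    rw [bLoop, List.drop_eq_nil_of_le (by omega)]
    simp [runsOf]
  | succ fuel ih =>
  by_cases hi : i < lst.length
  · rw [bLoop, if_pos hi]
    have hdropi : lst.drop i = lst[i] :: lst.drop (i + 1) := List.drop_eq_getElem_cons hi
    have hre := runEnd_spec lst i hi
    have happ := splitRun_append lst[i] (lst.drop (i + 1))
    have h1 := congrArg (List.take (splitRun lst[i] (lst.drop (i + 1))).1.length) happ
    rw [List.take_left] at h1
    have h2 := congrArg (List.drop (splitRun lst[i] (lst.drop (i + 1))).1.length) happ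
    rw [List.drop_left] at h2
    have hslice : PySem.List.slice lst (some (i : Int)) (some ((runEnd lst i : Nat) : Int))
        = lst[i] :: (splitRun lst[i] (lst.drop (i + 1))).1 := by
      rw [PySem.List.slice_natCast, hre, hdropi]
      rw [show (i + 1) + (splitRun lst[i] (lst.drop (i + 1))).1.length - i
            = (splitRun lst[i] (lst.drop (i + 1))).1.length + 1 from by omega]
      rw [List.take_succ_cons, ← h1]
    have hdropj : lst.drop (runEnd lst i) = (splitRun lst[i] (lst.drop (i + 1))).2 := by
      rw [hre, ← List.drop_drop, ← h2]
    have hj : i + 1 ≤ runEnd lst i := by omega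
    rw [ih (runEnd lst i) _ (by
      have hlen := congrArg List.length happ
      simp only [List.length_append, List.length_drop] at hlen
      omega)]
    rw [hslice, hdropj]
    have hrw : runsOf (List.drop i lst)
        = (lst[i] :: (splitRun lst[i] (List.drop (i + 1) lst)).1)
          :: runsOf (splitRun lst[i] (List.drop (i + 1) lst)).2 := by
      rw [hdropi]; simp only [runsOf]
    rw [hrw]
    simp
  · rw [bLoop, if_neg hi, List.drop_eq_nil_of_le (by omega)]
    simp [runsOf]

-- ===== VERDICT (by name: the statement is the Claim_ definition above) =====
theorem split_substring_spec : Claim_equal_split_substring := by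
  intro l _ hpre
  unfold Spec_split_substring
  match l with
  | [] => exact absurd rfl hpre
  | x :: xs =>
    unfold split_substring split_substring_alt
    rw [bLoop_spec (x :: xs) (x :: xs).length 0 [] (by omega)]
    simp only [PySem.List.pyGet?_zero_cons, PySem.List.slice_from_one, List.tail_cons]
    rw [subListA_eq_runsOf x xs]
    simp
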